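-- pv_equiv track=rewrite | github.com/FermiParadox/lol_calc | factory_module.py | _dct_body_to_pretty_formatted_str
-- ===== SOURCE A (Python) =====
-- import pprint as pp
--
-- def _dct_body_to_pretty_formatted_str(given_dct, width):
--     """
--     Converts given dct (body) to a pretty formatted string.
--     Used for file writing.
--
--     Args:
--         width: 1 or (false value) used for depth 1 dicts
--     Returns:
--         (str)
--     """
--
--     if width:
--         string = pp.pformat(given_dct, width=width)[1:]
--     # (else width gets default value)
--     else:
--         string = pp.pformat(given_dct)[1:]
--
--     new_str = ''
--     for num, line in enumerate(string.split('\n')):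
--         if num == 0:
--             # (pprint module always inserts one less whitespace for first line)
--             # (indent=1 is default, giving everything one extra whitespace)
--             new_str += ' '*4 + line + '\n'
--         else:
--             new_str += ' '*3 + line + '\n'
--
--     return '{\n' + new_str
-- ===== SOURCE B (Python) =====
-- def _dct_body_to_pretty_formatted_str(given_dct, width):
--     # Build the body directly (sorted items, repr formatting) instead of
--     # post-processing pprint's output line by line.
--     parts = ['%r: %r' % kv for kv in sorted(given_dct.items(), key=lambda kv: kv[0])]
--     w = width if width else 80
--     one_line = '{' + ', '.join(parts) + '}'
--     sep = ', ' if len(one_line) <= w else ',\n    '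
--     return '{\n    ' + sep.join(parts) + '}\n'
-- ===== Notes on version B (the rewrite author's own statement) =====
-- stated objective: simpler
-- what changed: B builds the body directly from the sorted repr'd items with a single join (separator chosen by the same width test), instead of running pprint and re-indenting its output line by line with an enumerate loop.
import Mathlib
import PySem

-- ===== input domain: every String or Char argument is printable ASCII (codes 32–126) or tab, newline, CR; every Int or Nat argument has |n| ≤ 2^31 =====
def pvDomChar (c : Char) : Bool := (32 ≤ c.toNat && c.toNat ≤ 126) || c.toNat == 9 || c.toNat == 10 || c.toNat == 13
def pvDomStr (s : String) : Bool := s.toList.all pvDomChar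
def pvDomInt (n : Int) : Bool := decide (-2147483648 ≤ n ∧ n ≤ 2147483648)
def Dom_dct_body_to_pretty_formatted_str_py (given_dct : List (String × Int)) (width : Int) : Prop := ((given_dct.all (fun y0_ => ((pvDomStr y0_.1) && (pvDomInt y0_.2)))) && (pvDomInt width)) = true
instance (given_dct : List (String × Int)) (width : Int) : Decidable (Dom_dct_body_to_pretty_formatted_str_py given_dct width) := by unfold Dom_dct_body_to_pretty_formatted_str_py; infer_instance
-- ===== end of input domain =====

-- B builds the body directly from the sorted items with one join (objective: simpler);
-- A post-processes pprint's output line by line.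

-- ===== PORT A =====
-- Quote character CPython's str repr picks: ' unless the string has a ' and no ".
def pvQuote (s : String) : Char :=
  if s.toList.contains '\'' && !(s.toList.contains '"') then '"' else '\''

-- Hand port of one character inside repr(s) with quote q (exact on Dom's character
-- set: printable ASCII plus tab/newline/CR).
def pvReprChar (q : Char) (c : Char) : List Char :=
  if c = '\\' then ['\\', '\\']
  else if c = q then ['\\', q]
  else if c = '\t' then ['\\', 't']
  else if c = '\n' then ['\\', 'n']
  else if c = '\r' then ['\\', 'r']
  else [c]

-- repr(s) for a str key (exact on Dom).
def pvReprStr (s : String) : List Char :=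
  pvQuote s :: (s.toList.flatMap (pvReprChar (pvQuote s)) ++ [pvQuote s])

-- "repr(key): repr(value)" — one dict item as pprint renders it.
def pvItemChars (kv : String × Int) : List Char :=
  pvReprStr kv.1 ++ (':' :: ' ' :: PySem.Int.toChars kv.2)

-- Hand port of pprint.pformat(d, width=w) for a flat dict[str, int] (exact for this
-- type: items sorted by key; one line '{k: v, …}' iff len(repr) ≤ w, else one item
-- per line separated by ',\n ').
def pvPformat (d : List (String × Int)) (w : Int) : List Char :=
  let parts := (PySem.List.sorted (PySem.Dict.ofList d).items (fun kv => kv.1)).map pvItemChars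
  let rep := '{' :: (PySem.Chars.join [',', ' '] parts ++ ['}'])
  if (rep.length : Int) ≤ w then rep
  else '{' :: (PySem.Chars.join [',', '\n', ' '] parts ++ ['}'])

def dct_body_to_pretty_formatted_str_py (given_dct : List (String × Int)) (width : Int) : String :=
  -- if width: string = pformat(given_dct, width)[1:]  else: string = pformat(given_dct)[1:]  (default width 80)
  let string : List Char :=
    if width ≠ 0 then PySem.Chars.slice (pvPformat given_dct width) (some 1) none
    else PySem.Chars.slice (pvPformat given_dct 80) (some 1) none
  -- for num, line in enumerate(string.split('\n')): …
  let new_str : List Char :=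
    (PySem.List.enumerate (PySem.Chars.splitOn string ['\n']) 0).foldl
      (fun acc p =>
        if p.1 == 0 then acc ++ (List.replicate 4 ' ' ++ p.2 ++ ['\n'])
        else acc ++ (List.replicate 3 ' ' ++ p.2 ++ ['\n'])) []
  String.ofList ('{' :: '\n' :: new_str)

-- ===== PORT B =====
def dct_body_to_pretty_formatted_str_py_alt (given_dct : List (String × Int)) (width : Int) : String :=
  let parts := (PySem.List.sorted (PySem.Dict.ofList given_dct).items (fun kv => kv.1)).map pvItemChars
  let w : Int := if width ≠ 0 then width else 80
  let one_line := '{' :: (PySem.Chars.join [',', ' '] parts ++ ['}'])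
  let sep : List Char := if (one_line.length : Int) ≤ w then [',', ' '] else [',', '\n', ' ', ' ', ' ', ' ']
  String.ofList (('{' :: '\n' :: List.replicate 4 ' ') ++ (PySem.Chars.join sep parts ++ ('}' :: ['\n'])))

-- ===== PRECONDITION & SPEC =====
def Spec_dct_body_to_pretty_formatted_str_py (given_dct : List (String × Int)) (width : Int) (out : String) : Prop := out = dct_body_to_pretty_formatted_str_py_alt given_dct width
instance (given_dct : List (String × Int)) (width : Int) (out : String) : Decidable (Spec_dct_body_to_pretty_formatted_str_py given_dct width out) := by unfold Spec_dct_body_to_pretty_formatted_str_py; infer_instance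

-- ===== CLAIM (what is proved, stated in full; the proofs are below) =====
def Claim_equal_dct_body_to_pretty_formatted_str_py : Prop := ∀ (given_dct : List (String × Int)) (width : Int), Dom_dct_body_to_pretty_formatted_str_py given_dct width → Spec_dct_body_to_pretty_formatted_str_py given_dct width (dct_body_to_pretty_formatted_str_py given_dct width)

-- ===== LEMMAS AND PROOFS =====

-- no character of a rendered item is a newline
theorem pv_digitChar_ne_newline (m : Nat) : Nat.digitChar m ≠ '\n' := by
  by_cases h : m < 16
  · interval_cases m <;> decide
  · unfold Nat.digitChar
    rw [if_neg (by omega), if_neg (by omega), if_neg (by omega), if_neg (by omega),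
        if_neg (by omega), if_neg (by omega), if_neg (by omega), if_neg (by omega),
        if_neg (by omega), if_neg (by omega), if_neg (by omega), if_neg (by omega),
        if_neg (by omega), if_neg (by omega), if_neg (by omega), if_neg (by omega)]
    decide

theorem pv_toDigitsCore_ne_newline (b f n : Nat) (ds : List Char)
    (h : ∀ c ∈ ds, c ≠ '\n') : ∀ c ∈ Nat.toDigitsCore b f n ds, c ≠ '\n' := by
  induction f generalizing n ds with
  | zero => simpa [Nat.toDigitsCore] using h
  | succ f ih =>
    intro c hc
    rw [Nat.toDigitsCore] at hc
    split at hc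
    · rcases List.mem_cons.mp hc with h1 | h1
      · subst h1; exact pv_digitChar_ne_newline _
      · exact h _ h1
    · refine ih _ _ (fun x hx => ?_) c hc
      rcases List.mem_cons.mp hx with h1 | h1
      · subst h1; exact pv_digitChar_ne_newline _
      · exact h _ h1

theorem pv_toChars_ne_newline (n : Int) : '\n' ∉ PySem.Int.toChars n := by
  intro h
  unfold PySem.Int.toChars at h
  split at h
  · rcases List.mem_cons.mp h with h1 | h1
    · exact absurd h1.symm (by decide)
    · exact pv_toDigitsCore_ne_newline 10 _ _ [] (by simp) _ h1 rfl
  · exact pv_toDigitsCore_ne_newline 10 _ _ [] (by simp) _ h rfl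

theorem pv_quote_ne_newline (s : String) : pvQuote s ≠ '\n' := by
  unfold pvQuote; split <;> decide

theorem pv_reprChar_ne_newline (q c : Char) (hq : q ≠ '\n') : '\n' ∉ pvReprChar q c := by
  unfold pvReprChar
  split_ifs with h1 h2 h3 h4 h5
  · decide
  · simp; exact fun h => hq h.symm
  · decide
  · decide
  · decide
  · simp; exact fun h => h4 h.symm

theorem pv_item_ne_newline (kv : String × Int) : '\n' ∉ pvItemChars kv := by
  unfold pvItemChars pvReprStr
  have hq := pv_quote_ne_newline kv.1
  intro h
  rcases List.mem_append.mp h with h | h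
  · rcases List.mem_cons.mp h with h | h
    · exact hq h.symm
    · rcases List.mem_append.mp h with h | h
      · rcases List.mem_flatMap.mp h with ⟨x, _, hx⟩
        exact pv_reprChar_ne_newline _ x hq hx
      · rw [List.mem_singleton] at h
        exact hq h.symm
  · rcases List.mem_cons.mp h with h | h
    · exact absurd h (by decide)
    · rcases List.mem_cons.mp h with h | h
      · exact absurd h (by decide)
      · exact pv_toChars_ne_newline kv.2 h

theorem pv_join_ne_newline (sep : List Char) (parts : List (List Char))
    (hsep : '\n' ∉ sep) (h : ∀ p ∈ parts, '\n' ∉ p) : '\n' ∉ PySem.Chars.join sep parts := by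
  induction parts with
  | nil => simp [PySem.Chars.join_nil]
  | cons p t ih =>
    cases t with
    | nil => rw [PySem.Chars.join_singleton]; exact h p (by simp)
    | cons q t' =>
      rw [PySem.Chars.join_cons_cons]
      intro hm
      rcases List.mem_append.mp hm with hm | hm
      · rcases List.mem_append.mp hm with hm | hm
        · exact h p (by simp) hm
        · exact hsep hm
      · exact ih (fun x hx => h x (List.mem_cons_of_mem _ hx)) hm

-- unfolding equations of splitOn's fueled worker (definitional)
theorem pv_go_zero (sep : List Char) (l cur : List Char) (acc : List (List Char)) :
    PySem.Chars.splitOn.go sep 0 l cur acc = ((cur.reverse ++ l) :: acc).reverse := rfl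

theorem pv_go_nil (sep : List Char) (f : Nat) (cur : List Char) (acc : List (List Char)) :
    PySem.Chars.splitOn.go sep (f + 1) [] cur acc = (cur.reverse :: acc).reverse := rfl

theorem pv_go_cons (sep : List Char) (f : Nat) (c : Char) (rest cur : List Char) (acc : List (List Char)) :
    PySem.Chars.splitOn.go sep (f + 1) (c :: rest) cur acc =
      if sep.isPrefixOf (c :: rest) then
        PySem.Chars.splitOn.go sep f (List.drop sep.length (c :: rest)) [] (cur.reverse :: acc)
      else PySem.Chars.splitOn.go sep f rest (c :: cur) acc := rfl

-- splitOn with a single-character separator: accumulator and structure lemmas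
theorem pv_splitOn_go_acc (sep : List Char) (fuel : Nat) :
    ∀ (l cur : List Char) (acc : List (List Char)),
    PySem.Chars.splitOn.go sep fuel l cur acc = acc.reverse ++ PySem.Chars.splitOn.go sep fuel l cur [] := by
  induction fuel with
  | zero => intro l cur acc; simp [pv_go_zero]
  | succ f ih =>
    intro l cur acc
    cases l with
    | nil => simp [pv_go_nil]
    | cons c rest =>
      rw [pv_go_cons, pv_go_cons]
      split
      · rw [ih, ih (List.drop sep.length (c :: rest)) [] [cur.reverse]]
        simp
      · exact ih rest (c :: cur) acc

theorem pv_splitOn_go_free (c : Char) (s : List Char) (hf : c ∉ s) :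
    ∀ (fuel : Nat) (cur : List Char) (acc : List (List Char)), s.length < fuel →
    PySem.Chars.splitOn.go [c] fuel s cur acc = acc.reverse ++ [cur.reverse ++ s] := by
  induction s with
  | nil =>
    intro fuel cur acc hfuel
    cases fuel with
    | zero => simp at hfuel
    | succ f => simp [pv_go_nil]
  | cons x rest ih =>
    intro fuel cur acc hfuel
    cases fuel with
    | zero => simp at hfuel
    | succ f =>
      rw [pv_go_cons]
      have hxc : x ≠ c := fun h => hf (by simp [h])
      have hpre : [c].isPrefixOf (x :: rest) = false := by
        simp [List.isPrefixOf]; exact fun h => absurd h.symm hxc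
      rw [if_neg (by simp [hpre])]
      rw [ih (fun h => hf (List.mem_cons_of_mem _ h)) f (x :: cur) acc (by simpa using Nat.lt_of_succ_lt_succ hfuel)]
      simp

theorem pv_splitOn_go_split (c : Char) (xs : List Char) (hf : c ∉ xs) :
    ∀ (fuel : Nat) (ys cur : List Char) (acc : List (List Char)),
    PySem.Chars.splitOn.go [c] (xs.length + 1 + fuel) (xs ++ c :: ys) cur acc
      = PySem.Chars.splitOn.go [c] fuel ys [] ((cur.reverse ++ xs) :: acc) := by
  induction xs with
  | nil =>
    intro fuel ys cur acc
    simp only [List.length_nil, List.nil_append, List.append_nil, Nat.zero_add]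
    rw [Nat.add_comm 1 fuel, pv_go_cons]
    rw [if_pos (by simp [List.isPrefixOf])]
    simp
  | cons x rest ih =>
    intro fuel ys cur acc
    have hxc : x ≠ c := fun h => hf (by simp [h])
    rw [show (x :: rest).length + 1 + fuel = (rest.length + 1 + fuel) + 1 by simp; omega]
    rw [show (x :: rest) ++ c :: ys = x :: (rest ++ c :: ys) from rfl]
    rw [pv_go_cons]
    have hpre : [c].isPrefixOf (x :: (rest ++ c :: ys)) = false := by
      simp [List.isPrefixOf]; exact fun h => absurd h.symm hxc
    rw [if_neg (by simp [hpre])]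
    rw [ih (fun h => hf (List.mem_cons_of_mem _ h)) fuel ys (x :: cur) acc]
    simp

theorem pv_splitOn_free (c : Char) (s : List Char) (hf : c ∉ s) :
    PySem.Chars.splitOn s [c] = [s] := by
  unfold PySem.Chars.splitOn
  simpa using pv_splitOn_go_free c s hf (s.length + 1) [] [] (by omega)

theorem pv_splitOn_split (c : Char) (xs ys : List Char) (hf : c ∉ xs) :
    PySem.Chars.splitOn (xs ++ c :: ys) [c] = xs :: PySem.Chars.splitOn ys [c] := by
  unfold PySem.Chars.splitOn
  rw [show (xs ++ c :: ys).length + 1 = xs.length + 1 + (ys.length + 1) by simp; omega]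
  rw [pv_splitOn_go_split c xs hf (ys.length + 1) ys [] []]
  rw [pv_splitOn_go_acc [c] (ys.length + 1)]
  simp

-- the tail of A's enumerate loop (num ≥ 1 ⇒ the 3-space branch)
theorem pv_loop_tail (rest : List (List Char)) :
    ∀ (s : Int), 1 ≤ s → ∀ (acc : List Char),
    (PySem.List.enumerate rest s).foldl
      (fun acc p =>
        if p.1 == 0 then acc ++ (List.replicate 4 ' ' ++ p.2 ++ ['\n'])
        else acc ++ (List.replicate 3 ' ' ++ p.2 ++ ['\n'])) acc
    = acc ++ (rest.map (fun l => List.replicate 3 ' ' ++ l ++ ['\n'])).flatten := by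
  induction rest with
  | nil => intro s hs acc; simp [PySem.List.enumerate_nil]
  | cons p t ih =>
    intro s hs acc
    rw [PySem.List.enumerate_cons, List.foldl_cons]
    rw [if_neg (by simp; omega)]
    rw [ih (s + 1) (by omega)]
    simp

-- A's whole loop on a newline-free string
theorem pv_loop_free (s : List Char) (hf : '\n' ∉ s) :
    (PySem.List.enumerate (PySem.Chars.splitOn s ['\n']) 0).foldl
      (fun acc p =>
        if p.1 == 0 then acc ++ (List.replicate 4 ' ' ++ p.2 ++ ['\n'])
        else acc ++ (List.replicate 3 ' ' ++ p.2 ++ ['\n'])) []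
    = List.replicate 4 ' ' ++ s ++ ['\n'] := by
  rw [pv_splitOn_free '\n' s hf]
  rw [show PySem.List.enumerate [s] 0 = [(0, s)] by simp [PySem.List.enumerate_cons, PySem.List.enumerate_nil]]
  simp

-- lines 2..n of the multiline body, rendered by A's loop = B's ",\n    " join
theorem pv_tail_join (parts : List (List Char)) (hne : parts ≠ [])
    (hfree : ∀ p ∈ parts, '\n' ∉ p) :
    ((PySem.Chars.splitOn (' ' :: (PySem.Chars.join [',', '\n', ' '] parts ++ ['}'])) ['\n']).map
        (fun l => List.replicate 3 ' ' ++ l ++ ['\n'])).flatten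
    = List.replicate 4 ' ' ++ PySem.Chars.join [',', '\n', ' ', ' ', ' ', ' '] parts ++ ['}', '\n'] := by
  induction parts with
  | nil => exact absurd rfl hne
  | cons p t ih =>
    cases t with
    | nil =>
      rw [PySem.Chars.join_singleton, PySem.Chars.join_singleton]
      have hnm : '\n' ∉ (' ' :: (p ++ ['}'])) := by
        simp
        exact fun h => (hfree p (by simp)) h
      rw [pv_splitOn_free '\n' _ hnm]
      simp
    | cons q t' =>
      rw [PySem.Chars.join_cons_cons]
      have hsh : (' ' :: ((p ++ [',', '\n', ' '] ++ PySem.Chars.join [',', '\n', ' '] (q :: t')) ++ ['}']))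
          = ((' ' :: p ++ [',']) ++ '\n' :: (' ' :: (PySem.Chars.join [',', '\n', ' '] (q :: t') ++ ['}']))) := by
        simp
      rw [hsh]
      rw [pv_splitOn_split '\n' _ _ (by simp; exact fun h => (hfree p (by simp)) h)]
      rw [List.map_cons, List.flatten_cons]
      rw [ih (by simp) (fun x hx => hfree x (List.mem_cons_of_mem _ hx))]
      rw [PySem.Chars.join_cons_cons]
      simp

-- ===== VERDICT (by name: the statement is the Claim_ definition above) =====
theorem dct_body_to_pretty_formatted_str_py_spec : Claim_equal_dct_body_to_pretty_formatted_str_py := by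
  intro given_dct width _
  unfold Spec_dct_body_to_pretty_formatted_str_py
  unfold dct_body_to_pretty_formatted_str_py dct_body_to_pretty_formatted_str_py_alt pvPformat
  set parts := (PySem.List.sorted (PySem.Dict.ofList given_dct).items (fun kv => kv.1)).map pvItemChars with hparts
  have hfree : ∀ p ∈ parts, '\n' ∉ p := by
    intro p hp
    rw [hparts] at hp
    rcases List.mem_map.mp hp with ⟨kv, _, rfl⟩
    exact pv_item_ne_newline kv
  have main : ∀ W : Int,
      String.ofList ('{' :: '\n' ::
        (PySem.List.enumerate (PySem.Chars.splitOn
          (PySem.Chars.slice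
            (if ((('{' :: (PySem.Chars.join [',', ' '] parts ++ ['}'])).length : Int) ≤ W)
             then '{' :: (PySem.Chars.join [',', ' '] parts ++ ['}'])
             else '{' :: (PySem.Chars.join [',', '\n', ' '] parts ++ ['}'])) (some 1) none) ['\n']) 0).foldl
          (fun acc p =>
            if p.1 == 0 then acc ++ (List.replicate 4 ' ' ++ p.2 ++ ['\n'])
            else acc ++ (List.replicate 3 ' ' ++ p.2 ++ ['\n'])) [])
      = String.ofList (('{' :: '\n' :: List.replicate 4 ' ') ++
          (PySem.Chars.join
            (if ((('{' :: (PySem.Chars.join [',', ' '] parts ++ ['}'])).length : Int) ≤ W)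
             then [',', ' '] else [',', '\n', ' ', ' ', ' ', ' ']) parts ++ ('}' :: ['\n']))) := by
    intro W
    have hs1 : ∀ l : List Char, PySem.Chars.slice ('{' :: l) (some 1) none = l := by
      intro l
      rw [PySem.Chars.slice_eq_listSlice, PySem.List.slice_from _ (by omega : (0:Int) ≤ 1)]
      simp
    split
    · -- one line: the sliced string has no newline
      rw [hs1]
      have hfs : '\n' ∉ PySem.Chars.join [',', ' '] parts ++ ['}'] := by
        intro h
        rcases List.mem_append.mp h with h | h
        · exact pv_join_ne_newline [',', ' '] parts (by decide) hfree h
        · simp at h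
      rw [pv_loop_free _ hfs]
      simp
    · -- multiline
      rw [hs1]
      cases hp : parts with
      | nil =>
        rw [PySem.Chars.join_nil, PySem.Chars.join_nil]
        simp only [List.nil_append]
        rw [pv_splitOn_free '\n' _ (by simp)]
        rw [show PySem.List.enumerate [['}']] 0 = [(0, ['}'])] by
          simp [PySem.List.enumerate_cons, PySem.List.enumerate_nil]]
        simp
      | cons p t =>
        cases t with
        | nil =>
          rw [PySem.Chars.join_singleton, PySem.Chars.join_singleton]
          have hfp : '\n' ∉ p := hfree p (by rw [hp]; simp)
          rw [pv_splitOn_free '\n' _ (by simp; exact fun h => hfp h)]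
          rw [show ∀ x : List Char, PySem.List.enumerate [x] 0 = [(0, x)] by
            intro x; simp [PySem.List.enumerate_cons, PySem.List.enumerate_nil]]
          simp
        | cons q t' =>
          rw [PySem.Chars.join_cons_cons]
          have hfp : '\n' ∉ p := hfree p (by rw [hp]; simp)
          have hft : ∀ x ∈ (q :: t'), '\n' ∉ x := fun x hx => hfree x (by rw [hp]; exact List.mem_cons_of_mem _ hx)
          have hsh : ((p ++ [',', '\n', ' '] ++ PySem.Chars.join [',', '\n', ' '] (q :: t')) ++ ['}'])
              = ((p ++ [',']) ++ '\n' :: (' ' :: (PySem.Chars.join [',', '\n', ' '] (q :: t') ++ ['}']))) := by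
            simp
          rw [hsh]
          rw [pv_splitOn_split '\n' _ _ (by simp; exact fun h => hfp h)]
          rw [show ∀ (x : List Char) (r : List (List Char)),
              PySem.List.enumerate (x :: r) 0 = (0, x) :: PySem.List.enumerate r 1 by
            intro x r; rw [PySem.List.enumerate_cons]; norm_num]
          rw [List.foldl_cons, if_pos (by simp)]
          rw [pv_loop_tail _ 1 (by omega)]
          rw [pv_tail_join (q :: t') (by simp) hft]
          rw [PySem.Chars.join_cons_cons]
          simp
  by_cases hw : width ≠ 0
  · rw [if_pos hw, if_pos hw]
    exact main width
  · rw [if_neg hw, if_neg hw]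
    exact main 80
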